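-- pv_equiv track=rewrite | github.com/pierfrancescomartinello/XBWT-Dist | scripts/XBWT.py | nameTriplets
-- ===== SOURCE A (Python) =====
-- def nameTriplets(sortedTriplets):
--     """ TODO """
--     notUnique = False
--     lexName = []
--     lexName.append([2, sortedTriplets[0][0]])
--     #count = 1
--     for i in range(1, len(sortedTriplets)):
--         if sortedTriplets[i-1][1] == sortedTriplets[i][1]:
--             notUnique = True
--             # lexName.append(count)
--             lexName.append([lexName[i-1][0], sortedTriplets[i][0]])
--         else:
--             # count+=1
--             lexName.append([lexName[i-1][0]+1, sortedTriplets[i][0]])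
--     return lexName, notUnique
-- ===== SOURCE B (Python) =====
-- def nameTriplets(sortedTriplets):
--     n = len(sortedTriplets)
--     runs = []
--     i = 0
--     while i < n:
--         j = i + 1
--         while j < n and sortedTriplets[j][1] == sortedTriplets[j - 1][1]:
--             j += 1
--         runs.append((i, j))
--         i = j
--     lexName = []
--     for name, (s, e) in enumerate(runs, start=2):
--         for k in range(s, e):
--             lexName.append([name, sortedTriplets[k][0]])
--     return lexName, any(e - s > 1 for (s, e) in runs)
-- ===== Notes on version B (the rewrite author's own statement) =====
-- stated objective: alternative
-- what changed: A's single pass that derives each name by reading back the previously appended lexName entry is replaced by run-length grouping: an explicit two-level while loop first cuts the list into maximal runs of equal keys, then the runs are enumerated from 2 and each run emitted as a block; notUnique becomes 'some run has length > 1'.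
import Mathlib
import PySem

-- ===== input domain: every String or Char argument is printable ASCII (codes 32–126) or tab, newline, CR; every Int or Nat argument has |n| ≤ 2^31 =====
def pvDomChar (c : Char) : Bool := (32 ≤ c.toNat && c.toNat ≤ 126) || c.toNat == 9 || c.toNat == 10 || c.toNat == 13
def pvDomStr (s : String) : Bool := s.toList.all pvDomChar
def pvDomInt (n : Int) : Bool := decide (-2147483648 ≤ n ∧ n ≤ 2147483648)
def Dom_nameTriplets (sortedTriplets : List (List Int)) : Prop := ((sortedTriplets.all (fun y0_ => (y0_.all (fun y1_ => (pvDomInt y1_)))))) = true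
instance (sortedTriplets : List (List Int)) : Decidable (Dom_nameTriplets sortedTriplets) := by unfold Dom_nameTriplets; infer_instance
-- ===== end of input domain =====

-- B replaces A's single pass (each name read back from the already-built lexName) by run-length
-- grouping: cut the list into maximal runs of equal keys, then enumerate the runs from 2 and
-- emit each run as a block; same O(n) cost, a different algorithm/decomposition.

-- xs[i][j] as Python computes it; Pre_ guarantees the indices are in range, the default 0 is never used there
def pyIdx2 (xs : List (List Int)) (i j : Int) : Int :=
  ((PySem.List.pyGet? xs i).bind (fun r => PySem.List.pyGet? r j)).getD 0

-- ===== PORT A =====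
-- loop body of A: one iteration of 'for i in range(1, len(sortedTriplets))'
def stepA (st : List (List Int)) (s : List (List Int) × Bool) (i : Int) : List (List Int) × Bool :=
  if pyIdx2 st (i - 1) 1 == pyIdx2 st i 1 then
    (s.1 ++ [[pyIdx2 s.1 (i - 1) 0, pyIdx2 st i 0]], true)
  else
    (s.1 ++ [[pyIdx2 s.1 (i - 1) 0 + 1, pyIdx2 st i 0]], s.2)

def nameTriplets (sortedTriplets : List (List Int)) : List (List Int) × Bool :=
  -- lexName starts as [[2, sortedTriplets[0][0]]], notUnique as False
  (PySem.List.pyRange 1 sortedTriplets.length 1).foldl (stepA sortedTriplets)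
    ([[2, pyIdx2 sortedTriplets 0 0]], false)

-- ===== PORT B =====
-- B's inner while loop: advance j while sortedTriplets[j][1] == sortedTriplets[j-1][1]
def runEnd (st : List (List Int)) (j : Nat) : Nat :=
  if h : j < st.length ∧ (pyIdx2 st (j : Int) 1 == pyIdx2 st ((j : Int) - 1) 1) then
    runEnd st (j + 1)
  else j
termination_by st.length - j
decreasing_by omega

-- termination helper for findRuns (cited by its decreasing_by)
lemma le_runEnd (st : List (List Int)) (j : Nat) : j ≤ runEnd st j := by
  rw [runEnd]
  split
  · have := le_runEnd st (j + 1); omega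
  · exact le_rfl
termination_by st.length - j
decreasing_by rename_i h; omega

-- B's outer while loop: collect the maximal runs (half-open index intervals)
def findRuns (st : List (List Int)) (i : Nat) : List (Nat × Nat) :=
  if h : i < st.length then
    (i, runEnd st (i + 1)) :: findRuns st (runEnd st (i + 1))
  else []
termination_by st.length - i
decreasing_by have := le_runEnd st (i + 1); omega

-- B's inner for loop: 'for k in range(s, e): lexName.append([name, sortedTriplets[k][0]])'
def emitRun (st : List (List Int)) (name : Int) (r : Nat × Nat) : List (List Int) :=
  (PySem.List.pyRange (r.1 : Int) (r.2 : Int) 1).map (fun k => [name, pyIdx2 st k 0])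

def nameTriplets_alt (sortedTriplets : List (List Int)) : List (List Int) × Bool :=
  let runs := findRuns sortedTriplets 0
  -- 'for name, (s, e) in enumerate(runs, start=2): …'
  let lexName := (runs.foldl (fun a r => (a.1 ++ emitRun sortedTriplets a.2 r, a.2 + 1))
      (([] : List (List Int)), (2 : Int))).1
  (lexName, runs.any (fun r => decide (1 < r.2 - r.1)))

-- ===== PRECONDITION & SPEC =====
-- Pre_ excludes exactly the inputs where Python A raises IndexError: the empty list,
-- a singleton whose only row is empty, and longer inputs containing a row of length < 2.
def Pre_nameTriplets (sortedTriplets : List (List Int)) : Prop :=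
  sortedTriplets ≠ [] ∧
  (sortedTriplets.length = 1 → sortedTriplets.headI ≠ []) ∧
  (2 ≤ sortedTriplets.length → ∀ t ∈ sortedTriplets, 2 ≤ t.length)
instance (sortedTriplets : List (List Int)) : Decidable (Pre_nameTriplets sortedTriplets) := by
  unfold Pre_nameTriplets; infer_instance

def pvWitness_nameTriplets : List (List Int) := [[1, 2], [3, 2], [4, 5]]

def Spec_nameTriplets (sortedTriplets : List (List Int)) (out : List (List Int) × Bool) : Prop := out = nameTriplets_alt sortedTriplets
instance (sortedTriplets : List (List Int)) (out : List (List Int) × Bool) : Decidable (Spec_nameTriplets sortedTriplets out) := by unfold Spec_nameTriplets; infer_instance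

-- ===== CLAIM (what is proved, stated in full; the proofs are below) =====
def Claim_equal_nameTriplets : Prop := ∀ (sortedTriplets : List (List Int)), Dom_nameTriplets sortedTriplets → Pre_nameTriplets sortedTriplets → Spec_nameTriplets sortedTriplets (nameTriplets sortedTriplets)

-- ===== LEMMAS AND PROOFS =====

lemma runEnd_le (st : List (List Int)) (j : Nat) (h : j ≤ st.length) : runEnd st j ≤ st.length := by
  rw [runEnd]
  split
  · rename_i hc; exact runEnd_le st (j + 1) (by omega)
  · exact h
termination_by st.length - j
decreasing_by rename_i hc; omega

-- the loop's exit condition holds at its result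
lemma runEnd_spec (st : List (List Int)) (j : Nat) :
    ¬ (runEnd st j < st.length ∧
       (pyIdx2 st ((runEnd st j : Nat) : Int) 1 == pyIdx2 st (((runEnd st j : Nat) : Int) - 1) 1)) := by
  rw [runEnd]
  split
  · exact runEnd_spec st (j + 1)
  · rename_i hc; exact hc
termination_by st.length - j
decreasing_by rename_i hc; omega

lemma pyGet0_pair (m v : Int) : (PySem.List.pyGet? [m, v] 0).getD 0 = m := by
  rw [show (0 : Int) = ((0 : Nat) : Int) from rfl, PySem.List.pyGet?_natCast]; rfl

lemma pyIdx2_nat (xs : List (List Int)) (k : Nat) (h : k < xs.length) :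
    pyIdx2 xs (k : Int) 0 = (PySem.List.pyGet? xs[k] 0).getD 0 := by
  simp [pyIdx2, PySem.List.pyGet?_natCast, List.getElem?_eq_getElem h]

-- reading the name of the row just appended
lemma read_last (lex : List (List Int)) (m v : Int) (i : Int) (h : i = (lex.length : Int)) :
    pyIdx2 (lex ++ [[m, v]]) i 0 = m := by
  subst h
  rw [pyIdx2_nat (lex ++ [[m, v]]) lex.length (by simp)]
  simp only [List.getElem_concat_length]
  exact pyGet0_pair m v

lemma emitRun_length (st : List (List Int)) (m : Int) (s e : Nat) :
    (emitRun st m (s, e)).length = ((e : Int) - (s : Int)).toNat := by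
  simp [emitRun, PySem.List.length_pyRange_one]

-- reading the name of the last row of an emitted run
lemma read_emit (st lex : List (List Int)) (m : Int) (s e : Nat)
    (hlen : lex.length = s) (hlt : s < e) :
    pyIdx2 (lex ++ emitRun st m (s, e)) ((e : Int) - 1) 0 = m := by
  have hL : (emitRun st m (s, e)).length = e - s := by
    rw [emitRun_length]; omega
  have hcast : ((e : Int) - 1) = (((e - 1 : Nat)) : Int) := by omega
  have hidx : e - 1 < (lex ++ emitRun st m (s, e)).length := by
    simp [hL, hlen]; omega
  rw [hcast, pyIdx2_nat _ (e - 1) hidx]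
  have hge : lex.length ≤ e - 1 := by omega
  rw [List.getElem_append_right hge]
  have hk : e - 1 - lex.length < (PySem.List.pyRange (s : Int) (e : Int) 1).length := by
    simp [PySem.List.length_pyRange_one]; omega
  simp only [emitRun, List.getElem_map]
  rw [PySem.List.getElem_pyRange_one]
  exact pyGet0_pair _ _

-- continuing a run: A's loop from i appends name m until the run ends at runEnd st i
lemma contRun (st : List (List Int)) (i : Nat) (lex : List (List Int)) (u : Bool) (m : Int)
    (h2 : lex.length = i) (h3 : pyIdx2 lex ((i : Int) - 1) 0 = m) :
    (PySem.List.pyRange (i : Int) (st.length : Int) 1).foldl (stepA st) (lex, u)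
    = (PySem.List.pyRange ((runEnd st i : Nat) : Int) (st.length : Int) 1).foldl (stepA st)
        (lex ++ (PySem.List.pyRange (i : Int) ((runEnd st i : Nat) : Int) 1).map
            (fun k => [m, pyIdx2 st k 0]),
         u || decide (i < runEnd st i)) := by
  by_cases hc : i < st.length ∧ (pyIdx2 st (i : Int) 1 == pyIdx2 st ((i : Int) - 1) 1)
  · have hre : runEnd st i = runEnd st (i + 1) := by rw [runEnd, dif_pos hc]
    have hlt : (i : Int) < (st.length : Int) := by exact_mod_cast hc.1
    rw [PySem.List.pyRange_one_cons hlt, List.foldl_cons]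
    have hcond : (pyIdx2 st ((i : Int) - 1) 1 == pyIdx2 st (i : Int) 1) = true := by
      have := hc.2; rw [beq_iff_eq] at this ⊢; omega
    have hstep : stepA st (lex, u) (i : Int)
        = (lex ++ [[m, pyIdx2 st (i : Int) 0]], true) := by
      simp [stepA, hcond, h3]
    rw [hstep]
    have hrec := contRun st (i + 1) (lex ++ [[m, pyIdx2 st (i : Int) 0]]) true m
      (by simp [h2]) (read_last lex m _ _ (by push_cast; omega))
    have hcast : (((i + 1 : Nat)) : Int) = (i : Int) + 1 := by push_cast; ring
    rw [hcast] at hrec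
    rw [hrec, hre]
    have hge : i + 1 ≤ runEnd st (i + 1) := le_runEnd st (i + 1)
    have hsplit : PySem.List.pyRange (i : Int) ((runEnd st (i + 1) : Nat) : Int) 1
        = (i : Int) :: PySem.List.pyRange ((i : Int) + 1) ((runEnd st (i + 1) : Nat) : Int) 1 := by
      rw [PySem.List.pyRange_one_cons (by exact_mod_cast (by omega : i < runEnd st (i + 1)))]
    rw [hsplit, List.map_cons]
    have hdec : decide (i < runEnd st (i + 1)) = true := by simp; omega
    simp [hdec, List.append_assoc]
  · have hre : runEnd st i = i := by rw [runEnd, dif_neg hc]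
    rw [hre]
    simp [PySem.List.pyRange_one_eq_nil (le_refl (i : Int))]
termination_by st.length - i
decreasing_by omega

-- B's emit fold over the runs starting at a run boundary s equals A's remaining loop
lemma runsLemma (st : List (List Int)) (s : Nat) (lex : List (List Int)) (u : Bool) (m : Int)
    (h2 : lex.length = s) (h3 : pyIdx2 lex ((s : Int) - 1) 0 = m)
    (hb : ¬ (s < st.length ∧ (pyIdx2 st (s : Int) 1 == pyIdx2 st ((s : Int) - 1) 1))) :
    (PySem.List.pyRange (s : Int) (st.length : Int) 1).foldl (stepA st) (lex, u)
    = (((findRuns st s).foldl (fun a r => (a.1 ++ emitRun st a.2 r, a.2 + 1)) (lex, m + 1)).1,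
       u || (findRuns st s).any (fun r => decide (1 < r.2 - r.1))) := by
  by_cases hs : s < st.length
  · -- one more run (s, e)
    set e := runEnd st (s + 1) with he
    have hse : s + 1 ≤ e := le_runEnd st (s + 1)
    have hen : e ≤ st.length := runEnd_le st (s + 1) (by omega)
    have hruns : findRuns st s = (s, e) :: findRuns st e := by
      rw [findRuns, dif_pos hs]
    -- A's step at s takes the else branch
    have hne : pyIdx2 st (s : Int) 1 ≠ pyIdx2 st ((s : Int) - 1) 1 := by
      intro hEq; exact hb ⟨hs, beq_iff_eq.mpr hEq⟩
    have hcond : (pyIdx2 st ((s : Int) - 1) 1 == pyIdx2 st (s : Int) 1) = false :=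
      beq_eq_false_iff_ne.mpr (Ne.symm hne)
    have hlt : (s : Int) < (st.length : Int) := by exact_mod_cast hs
    rw [PySem.List.pyRange_one_cons hlt, List.foldl_cons]
    have hstep : stepA st (lex, u) (s : Int)
        = (lex ++ [[m + 1, pyIdx2 st (s : Int) 0]], u) := by
      simp [stepA, hcond, h3]
    rw [hstep]
    have hcr := contRun st (s + 1) (lex ++ [[m + 1, pyIdx2 st (s : Int) 0]]) u (m + 1)
      (by simp [h2]) (read_last lex (m + 1) _ _ (by push_cast; omega))
    have hcast : (((s + 1 : Nat)) : Int) = (s : Int) + 1 := by push_cast; ring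
    rw [hcast] at hcr
    rw [hcr, ← he]
    -- the accumulated block is exactly emitRun st (m+1) (s, e)
    have hblock : (lex ++ [[m + 1, pyIdx2 st (s : Int) 0]])
        ++ (PySem.List.pyRange ((s : Int) + 1) ((e : Nat) : Int) 1).map
            (fun k => [m + 1, pyIdx2 st k 0])
        = lex ++ emitRun st (m + 1) (s, e) := by
      rw [List.append_assoc]
      congr 1
      conv_rhs => rw [emitRun]
      conv_rhs =>
        rw [show (((s, e).1 : Nat) : Int) = (s : Int) from rfl,
            show (((s, e).2 : Nat) : Int) = (e : Int) from rfl,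
            PySem.List.pyRange_one_cons (by exact_mod_cast (by omega : s < e)), List.map_cons]
      rfl
    rw [hblock]
    have hrl := runsLemma st e (lex ++ emitRun st (m + 1) (s, e))
      (u || decide (s + 1 < e)) (m + 1)
      (by rw [List.length_append, h2, emitRun_length]; omega)
      (read_emit st lex (m + 1) s e h2 (by omega))
      (by
        have := runEnd_spec st (s + 1)
        rw [← he] at this
        exact this)
    rw [hrl, hruns, List.foldl_cons, List.any_cons]
    have hflag : decide (s + 1 < e) = decide (1 < e - s) :=
      decide_eq_decide.mpr (by omega)
    rw [hflag, Bool.or_assoc]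
  · have hruns : findRuns st s = [] := by rw [findRuns, dif_neg hs]
    have hnil : PySem.List.pyRange (s : Int) (st.length : Int) 1 = [] :=
      PySem.List.pyRange_one_eq_nil (by exact_mod_cast Nat.le_of_not_lt hs)
    rw [hruns, hnil]
    simp
termination_by st.length - s
decreasing_by omega

-- ===== VERDICT (by name: the statement is the Claim_ definition above) =====
theorem nameTriplets_spec : Claim_equal_nameTriplets := by
  intro st _ hpre
  obtain ⟨h1, -, -⟩ := hpre
  have hn : 1 ≤ st.length := by
    cases st with
    | nil => exact absurd rfl h1
    | cons t rest => simp
  unfold Spec_nameTriplets nameTriplets nameTriplets_alt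
  set e0 := runEnd st 1 with he0
  have he1 : 1 ≤ e0 := le_runEnd st 1
  have hcr := contRun st 1 [[2, pyIdx2 st 0 0]] false 2 (by simp)
    (by rw [show ((1 : Nat) : Int) - 1 = ((0 : Nat) : Int) by omega,
        pyIdx2_nat _ 0 (by simp)]; exact pyGet0_pair 2 _)
  rw [show ((1 : Nat) : Int) = (1 : Int) from rfl] at hcr
  rw [hcr, ← he0]
  have hblock : [[2, pyIdx2 st 0 0]]
      ++ (PySem.List.pyRange (1 : Int) ((e0 : Nat) : Int) 1).map (fun k => [2, pyIdx2 st k 0])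
      = [] ++ emitRun st 2 (0, e0) := by
    rw [List.nil_append]
    conv_rhs => rw [emitRun]
    conv_rhs =>
      rw [show (((0, e0).1 : Nat) : Int) = (0 : Int) from rfl,
          show (((0, e0).2 : Nat) : Int) = (e0 : Int) from rfl,
          PySem.List.pyRange_one_cons (by exact_mod_cast (by omega : 0 < e0)), List.map_cons]
    rfl
  rw [hblock]
  have hrl := runsLemma st e0 ([] ++ emitRun st 2 (0, e0)) (false || decide (1 < e0)) 2
    (by rw [List.length_append, emitRun_length]; simp)
    (read_emit st [] 2 0 e0 (by simp) (by omega))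
    (by have := runEnd_spec st 1; rw [← he0] at this; exact this)
  rw [hrl]
  have hruns0 : findRuns st 0 = (0, e0) :: findRuns st e0 := by
    rw [findRuns, dif_pos (show 0 < st.length by omega)]
  rw [hruns0]
  simp [List.any_cons]
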